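-- pv_equiv track=rewrite | github.com/daniel-reich/turbo-robot | LDQvCxTPv4iiY8B2A_17.py | same_upsidedown
-- ===== SOURCE A (Python) =====
-- def same_upsidedown(ntxt):
--   upside_down = ""
--   for char in ntxt[::-1]:
--     if char == "6":
--       upside_down += "9"
--     elif char == "9":
--       upside_down += "6"
--     else:
--       upside_down += char
--   return ntxt == upside_down
-- ===== SOURCE B (Python) =====
-- def same_upsidedown(ntxt):
--   i, j = 0, len(ntxt) - 1
--   while i <= j:
--     cj = ntxt[j]
--     flipped = "9" if cj == "6" else "6" if cj == "9" else cj
--     if ntxt[i] != flipped: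
--       return False
--     i += 1
--     j -= 1
--   return True
-- ===== Notes on version B (the rewrite author's own statement) =====
-- stated objective: alternative
-- what changed: Replaces building the flipped reversed string and comparing whole strings with a two-pointer loop converging from both ends that compares each char to the flip of its mirror and short-circuits, building no intermediate string and walking only half the string.
import Mathlib
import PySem

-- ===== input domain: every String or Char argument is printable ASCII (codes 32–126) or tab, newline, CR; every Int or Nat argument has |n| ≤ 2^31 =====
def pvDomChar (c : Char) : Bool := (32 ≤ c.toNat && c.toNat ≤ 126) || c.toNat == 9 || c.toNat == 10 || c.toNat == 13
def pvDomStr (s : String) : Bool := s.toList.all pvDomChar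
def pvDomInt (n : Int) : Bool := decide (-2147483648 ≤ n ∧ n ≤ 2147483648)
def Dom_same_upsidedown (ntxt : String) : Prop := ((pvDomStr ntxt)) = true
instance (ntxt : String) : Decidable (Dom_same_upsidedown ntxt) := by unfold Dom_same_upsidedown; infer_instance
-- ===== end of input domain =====

-- B replaces A's build-flipped-reversed-string-and-compare with a two-pointer loop meeting in the middle (alternative decomposition, no intermediate string).

-- ===== PORT A =====
-- A: build upside_down by iterating over ntxt[::-1] (= reverse) appending the flip of each char, then compare the strings.
def same_upsidedown (ntxt : String) : Bool :=
  let upside_down : List Char :=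
    (ntxt.toList.reverse).foldl (fun acc char =>
      if char = '6' then acc ++ ['9']
      else if char = '9' then acc ++ ['6']
      else acc ++ [char]) []
  decide (ntxt.toList = upside_down)

-- ===== PORT B =====
-- the flip of a char (6<->9, else itself)
def flipB (c : Char) : Char := if c = '6' then '9' else if c = '9' then '6' else c

-- B's while loop: indices i, j converging toward the middle.  The `none` branches of the
-- indexing are dead code (every call keeps 0 ≤ i ≤ j < len, so both gets succeed).
def altGo (xs : List Char) (i j : Int) : Bool :=
  if i ≤ j then
    match PySem.List.pyGet? xs j with
    | some cj =>
      match PySem.List.pyGet? xs i with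
      | some ci => if ci ≠ flipB cj then false else altGo xs (i + 1) (j - 1)
      | none => false
    | none => false
  else true
termination_by (j + 1 - i).toNat
decreasing_by omega

def same_upsidedown_alt (ntxt : String) : Bool :=
  altGo ntxt.toList 0 (PySem.Str.len ntxt - 1)

-- ===== PRECONDITION & SPEC =====
def Spec_same_upsidedown (ntxt : String) (out : Bool) : Prop := out = same_upsidedown_alt ntxt
instance (ntxt : String) (out : Bool) : Decidable (Spec_same_upsidedown ntxt out) := by unfold Spec_same_upsidedown; infer_instance

-- ===== CLAIM (what is proved, stated in full; the proofs are below) =====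
def Claim_equal_same_upsidedown : Prop := ∀ (ntxt : String), Dom_same_upsidedown ntxt → Spec_same_upsidedown ntxt (same_upsidedown ntxt)

-- ===== LEMMAS AND PROOFS =====

theorem flipB_flipB (c : Char) : flipB (flipB c) = c := by
  unfold flipB; split_ifs <;> simp_all

-- A's fold builds the flip-map of the reversed list.
theorem A_fold_eq_map (xs : List Char) :
    xs.foldl (fun acc char =>
      if char = '6' then acc ++ ['9']
      else if char = '9' then acc ++ ['6']
      else acc ++ [char]) [] = xs.map flipB := by
  have h : (fun (acc : List Char) (char : Char) =>
      if char = '6' then acc ++ ['9']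
      else if char = '9' then acc ++ ['6']
      else acc ++ [char]) = fun acc char => acc ++ [flipB char] := by
    funext acc char; unfold flipB; split_ifs <;> rfl
  rw [h, PySem.List.foldl_append_singleton_eq_map]; simp

-- what the two-pointer loop checks: every pair (k, i+j-k) with k in the first half of [i, j]
theorem altGo_iff (xs : List Char) (i j : Int) (hi : 0 ≤ i) (hj : j < xs.length) :
    altGo xs i j = true ↔
      ∀ k : Int, i ≤ k → 2 * k ≤ i + j →
        PySem.List.pyGet? xs k = (PySem.List.pyGet? xs (i + j - k)).map flipB := by
  induction i, j using altGo.induct xs with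
  | case1 i j hij cj hcj ci hci hne =>
    rw [altGo]; simp only [if_pos hij, hcj, hci, if_pos hne]
    constructor
    · intro h; exact absurd h (by simp)
    · intro h
      have := h i le_rfl (by omega)
      simp only [show i + j - i = j by ring] at this
      rw [hci, hcj] at this
      simp at this
      exact absurd this hne
  | case2 i j hij cj hcj ci hci hne ih =>
    rw [altGo]; simp only [if_pos hij, hcj, hci, if_neg hne]
    have hget : PySem.List.pyGet? xs i = (PySem.List.pyGet? xs j).map flipB := by
      rw [hci, hcj]; simp at hne; simp [hne]
    rw [ih (by omega) (by omega)]
    constructor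
    · intro h k hk h2k
      rcases eq_or_lt_of_le hk with rfl | hk'
      · simpa [show i + j - i = j by ring] using hget
      · have := h k (by omega) (by omega)
        simpa [show i + 1 + (j - 1) = i + j by ring] using this
    · intro h k hk h2k
      have := h k (by omega) (by omega)
      simpa [show i + 1 + (j - 1) = i + j by ring] using this
  | case3 i j hij cj hcj hnone =>
    -- impossible: 0 ≤ i ≤ j < len, so pyGet? xs i = some _
    have h1 := Iff.mp (PySem.List.pyGet?_eq_none_iff _ _) hnone
    simp [PySem.Raise.InRange] at h1
    exact absurd hj (by omega)
  | case4 i j hij hnone =>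
    have h1 := Iff.mp (PySem.List.pyGet?_eq_none_iff _ _) hnone
    simp [PySem.Raise.InRange] at h1
    exact absurd hj (by omega)
  | case5 i j hij =>
    rw [altGo]; simp only [if_neg hij]
    constructor
    · intro _ k hk h2k; omega
    · intro _; trivial

-- the half-range pairwise check equals A's whole-string equality (uses that flipB is an involution)
theorem half_iff_full (xs : List Char) :
    (∀ k : Int, 0 ≤ k → 2 * k ≤ 0 + ((xs.length : Int) - 1) →
       PySem.List.pyGet? xs k = (PySem.List.pyGet? xs (0 + ((xs.length : Int) - 1) - k)).map flipB)
    ↔ xs = xs.reverse.map flipB := by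
  constructor
  · intro h
    apply List.ext_getElem (by simp)
    intro k hk hk2
    rw [List.getElem_map, List.getElem_reverse]
    by_cases hc : 2 * k + 1 ≤ xs.length
    · have h1 := h k (by omega) (by omega)
      rw [show (0 + ((xs.length : Int) - 1) - (k : Int)) = ((xs.length - 1 - k : Nat) : Int) by
        omega] at h1
      simp only [PySem.List.pyGet?_natCast,
        List.getElem?_eq_getElem hk,
        List.getElem?_eq_getElem (show xs.length - 1 - k < xs.length by omega),
        Option.map_some] at h1
      exact Option.some.inj h1
    · have hm : xs.length - 1 - k < xs.length := by omega
      have h1 := h ((xs.length - 1 - k : Nat) : Int) (by omega) (by omega)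
      rw [show (0 + ((xs.length : Int) - 1) - ((xs.length - 1 - k : Nat) : Int)) = ((k : Nat) : Int) by
        omega] at h1
      simp only [PySem.List.pyGet?_natCast,
        List.getElem?_eq_getElem hk,
        List.getElem?_eq_getElem hm,
        Option.map_some] at h1
      have h2 := congrArg flipB (Option.some.inj h1)
      rw [flipB_flipB] at h2
      exact h2.symm
  · intro h k hk0 hk2
    have hk' : k.toNat < xs.length := by omega
    have h9 : xs[k.toNat]? = (xs.reverse.map flipB)[k.toNat]? := congrArg (·[k.toNat]?) h
    rw [List.getElem?_map, List.getElem?_reverse hk'] at h9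
    rw [PySem.List.pyGet?_of_nonneg xs (i := k) (by omega),
        PySem.List.pyGet?_of_nonneg xs (i := 0 + ((xs.length : Int) - 1) - k) (by omega),
        show (0 + ((xs.length : Int) - 1) - k).toNat = xs.length - 1 - k.toNat by omega]
    exact h9

-- ===== VERDICT (by name: the statement is the Claim_ definition above) =====
theorem same_upsidedown_spec : Claim_equal_same_upsidedown := by
  intro ntxt _
  unfold Spec_same_upsidedown same_upsidedown same_upsidedown_alt
  rw [A_fold_eq_map]
  have hlen : PySem.Str.len ntxt = (ntxt.toList.length : Int) := by
    simp [PySem.Str.len_eq]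
  rw [hlen]
  have hiff : altGo ntxt.toList 0 ((ntxt.toList.length : Int) - 1) = true ↔
      ntxt.toList = ntxt.toList.reverse.map flipB :=
    (altGo_iff ntxt.toList 0 ((ntxt.toList.length : Int) - 1) le_rfl (by omega)).trans
      (half_iff_full ntxt.toList)
  by_cases hp : ntxt.toList = ntxt.toList.reverse.map flipB
  · rw [hiff.mpr hp]; exact decide_eq_true hp
  · have h4 : altGo ntxt.toList 0 ((ntxt.toList.length : Int) - 1) ≠ true :=
      fun hh => hp (hiff.mp hh)
    simp only [hp, decide_false]
    exact ((Bool.not_eq_true _).mp h4).symm
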